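-- pv_equiv track=rewrite | github.com/finn-chan/calendar-engine | app/contacts/converter.py | _format_with_empty_lines
-- ===== SOURCE A (Python) =====
-- def _format_with_empty_lines(ics_content: str) -> str:
--     """Format ICS content with empty lines between events.
--
--     Args:
--         ics_content: Original ICS content string
--
--     Returns:
--         Formatted ICS content with empty lines between events only
--     """
--     ics_content = ics_content.replace("\r\n", "\n")
--     lines = ics_content.split("\n")
--     formatted_lines = []
--
--     for line in lines:
--         if line.strip():
--             formatted_lines.append(line)
--             if line.strip() == "END:VEVENT":
--                 formatted_lines.append("")
--
--     if formatted_lines and not formatted_lines[-1].strip():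
--         formatted_lines.pop()
--
--     return "\n".join(formatted_lines)
-- ===== SOURCE B (Python) =====
-- def _format_with_empty_lines(ics_content: str) -> str:
--     """Format ICS content with empty lines between events (segment-based rewrite)."""
--     lines = [l for l in ics_content.replace("\r\n", "\n").split("\n") if l.strip()]
--     segments = []
--     current = []
--     for line in lines:
--         current.append(line)
--         if line.strip() == "END:VEVENT":
--             segments.append(current)
--             current = []
--     if current:
--         segments.append(current)
--     return "\n\n".join("\n".join(seg) for seg in segments)
-- ===== Notes on version B (the rewrite author's own statement) =====
-- stated objective: alternative
-- what changed: B partitions the non-blank lines into event segments closed at each END:VEVENT line and joins segments with a double newline, instead of A's sentinel-blank append-then-pop pass over one flat list.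
import Mathlib
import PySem

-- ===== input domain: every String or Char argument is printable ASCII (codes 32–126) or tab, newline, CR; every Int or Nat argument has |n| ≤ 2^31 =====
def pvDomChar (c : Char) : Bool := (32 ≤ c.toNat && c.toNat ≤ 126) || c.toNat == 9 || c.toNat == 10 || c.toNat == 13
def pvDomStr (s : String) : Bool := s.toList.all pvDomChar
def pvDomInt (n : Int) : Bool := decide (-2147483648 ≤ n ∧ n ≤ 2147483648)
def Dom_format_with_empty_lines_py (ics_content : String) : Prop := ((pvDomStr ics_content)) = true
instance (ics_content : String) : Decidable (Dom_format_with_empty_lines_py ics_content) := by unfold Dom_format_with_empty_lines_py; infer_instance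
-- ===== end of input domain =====

-- B replaces A's sentinel-blank append-then-pop list pass by partitioning the non-blank
-- lines into event segments (closed at each END:VEVENT) joined with a double newline;
-- objective: alternative decomposition, same value on every input.

-- ===== PORT A =====
def format_with_empty_lines_py (ics_content : String) : String :=
  let s := PySem.Chars.replace ics_content.toList "\r\n".toList "\n".toList
  let lines := PySem.Chars.splitOn s "\n".toList
  let formatted := lines.foldl (fun acc line =>
    if PySem.Chars.strip line ≠ [] then
      let acc := acc ++ [line]
      if PySem.Chars.strip line = "END:VEVENT".toList then acc ++ [([] : List Char)] else acc
    else acc) []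
  let formatted :=
    match formatted.getLast? with
    | some last => if PySem.Chars.strip last = [] then formatted.dropLast else formatted
    | none => formatted
  String.ofList (PySem.Chars.join "\n".toList formatted)

-- ===== PORT B =====
def format_with_empty_lines_py_alt (ics_content : String) : String :=
  let s := PySem.Chars.replace ics_content.toList "\r\n".toList "\n".toList
  let lines := (PySem.Chars.splitOn s "\n".toList).filter
    (fun l => PySem.Chars.strip l ≠ [])
  let st := lines.foldl
    (fun (st : List (List (List Char)) × List (List Char)) line =>
      if PySem.Chars.strip line = "END:VEVENT".toList then (st.1 ++ [st.2 ++ [line]], [])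
      else (st.1, st.2 ++ [line])) ([], [])
  let segs := if st.2 = [] then st.1 else st.1 ++ [st.2]
  String.ofList (PySem.Chars.join "\n\n".toList
    (segs.map (fun seg => PySem.Chars.join "\n".toList seg)))

-- ===== PRECONDITION & SPEC =====
def Spec_format_with_empty_lines_py (ics_content : String) (out : String) : Prop := out = format_with_empty_lines_py_alt ics_content
instance (ics_content : String) (out : String) : Decidable (Spec_format_with_empty_lines_py ics_content out) := by unfold Spec_format_with_empty_lines_py; infer_instance

-- ===== CLAIM (what is proved, stated in full; the proofs are below) =====
def Claim_equal_format_with_empty_lines_py : Prop := ∀ (ics_content : String), Dom_format_with_empty_lines_py ics_content → Spec_format_with_empty_lines_py ics_content (format_with_empty_lines_py ics_content)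

-- ===== LEMMAS AND PROOFS =====

-- per-line contribution of A's loop
def pvfA (l : List Char) : List (List Char) :=
  if PySem.Chars.strip l = [] then []
  else if PySem.Chars.strip l = "END:VEVENT".toList then [l, []] else [l]

-- A's trailing-blank pop
def pvPop (xs : List (List Char)) : List (List Char) :=
  match xs.getLast? with
  | some last => if PySem.Chars.strip last = [] then xs.dropLast else xs
  | none => xs

-- segments of the line list (blank lines skipped, segments closed at END:VEVENT)
def pvSeg : List (List Char) → List (List (List Char))
  | [] => []
  | l :: ls =>
    if PySem.Chars.strip l = [] then pvSeg ls
    else if PySem.Chars.strip l = "END:VEVENT".toList then [l] :: pvSeg ls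
    else
      match pvSeg ls with
      | [] => [[l]]
      | s :: ss => (l :: s) :: ss

-- segments of an (already blank-free) line list: pvSeg without the blank case
def pvSegP : List (List Char) → List (List (List Char))
  | [] => []
  | l :: ls =>
    if PySem.Chars.strip l = "END:VEVENT".toList then [l] :: pvSegP ls
    else
      match pvSegP ls with
      | [] => [[l]]
      | s :: ss => (l :: s) :: ss

-- segments interleaved with one blank line
def pvIcat : List (List (List Char)) → List (List Char)
  | [] => []
  | [s] => s
  | s :: ss => s ++ ([] : List Char) :: pvIcat ss

def pvGlue (cur : List (List Char)) (ss : List (List (List Char))) : List (List (List Char)) :=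
  match ss with
  | [] => if cur = [] then [] else [cur]
  | s :: ss => (cur ++ s) :: ss

def pvFin (st : List (List (List Char)) × List (List Char)) : List (List (List Char)) :=
  if st.2 = [] then st.1 else st.1 ++ [st.2]

theorem pvstrip_nil : PySem.Chars.strip ([] : List Char) = [] := by decide

theorem pvfoldA_eq (L : List (List Char)) (acc : List (List Char)) :
    L.foldl (fun acc line =>
      if PySem.Chars.strip line ≠ [] then
        let acc := acc ++ [line]
        if PySem.Chars.strip line = "END:VEVENT".toList then acc ++ [([] : List Char)] else acc
      else acc) acc = acc ++ L.flatMap pvfA := by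
  induction L generalizing acc with
  | nil => simp
  | cons l ls ih =>
    simp only [List.foldl_cons, List.flatMap_cons, pvfA]
    split_ifs with h1 h2 <;> simp_all

theorem pvSeg_nil_iff (L : List (List Char)) : L.flatMap pvfA = [] ↔ pvSeg L = [] := by
  induction L with
  | nil => simp [pvSeg]
  | cons l ls ih =>
    simp only [List.flatMap_cons, pvSeg, pvfA]
    split_ifs with h1 h2 <;> simp_all
    cases pvSeg ls <;> simp

theorem pvPop_cons (l : List Char) (xs : List (List Char)) (h : xs ≠ []) :
    pvPop (l :: xs) = l :: pvPop xs := by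
  cases xs with
  | nil => exact absurd rfl h
  | cons x xs' =>
    unfold pvPop
    rw [List.getLast?_cons_cons]
    cases hx : (x :: xs').getLast? with
    | none => simp at hx
    | some last =>
      dsimp only
      split_ifs with hs
      · rw [List.dropLast_cons₂]
      · rfl

theorem pvP1 (L : List (List Char)) : pvPop (L.flatMap pvfA) = pvIcat (pvSeg L) := by
  induction L with
  | nil => simp [pvPop, pvIcat, pvSeg]
  | cons l ls ih =>
    simp only [List.flatMap_cons, pvSeg, pvfA]
    split_ifs with h1 h2
    · simpa using ih
    · -- END:VEVENT line: contributes [l, []]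
      by_cases hrest : ls.flatMap pvfA = []
      · have hseg : pvSeg ls = [] := (pvSeg_nil_iff ls).mp hrest
        rw [hrest, hseg]
        simp [pvPop, pvIcat, pvstrip_nil]
      · have hseg : pvSeg ls ≠ [] := fun h => hrest ((pvSeg_nil_iff ls).mpr h)
        rw [show (([l, ([] : List Char)] : List (List Char)) ++ ls.flatMap pvfA)
              = l :: ([] : List Char) :: ls.flatMap pvfA by simp]
        rw [pvPop_cons _ _ (by simp), pvPop_cons _ _ hrest, ih]
        cases hc : pvSeg ls with
        | nil => exact absurd hc hseg
        | cons s ss => simp [pvIcat]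
    · -- ordinary non-blank line: contributes [l]
      by_cases hrest : ls.flatMap pvfA = []
      · have hseg : pvSeg ls = [] := (pvSeg_nil_iff ls).mp hrest
        rw [hrest, hseg]
        simp [pvPop, pvIcat, h1]
      · have hseg : pvSeg ls ≠ [] := fun h => hrest ((pvSeg_nil_iff ls).mpr h)
        rw [show (([l] : List (List Char)) ++ ls.flatMap pvfA) = l :: ls.flatMap pvfA by simp]
        rw [pvPop_cons _ _ hrest, ih]
        cases hc : pvSeg ls with
        | nil => exact absurd hc hseg
        | cons s ss => cases ss <;> simp [pvIcat]

theorem pvSeg_ne_nil (L : List (List Char)) : ∀ s ∈ pvSeg L, s ≠ [] := by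
  induction L with
  | nil => simp [pvSeg]
  | cons l ls ih =>
    simp only [pvSeg]
    split_ifs with h1 h2
    · exact ih
    · intro s hs
      rcases List.mem_cons.mp hs with hs | hs
      · simp [hs]
      · exact ih s hs
    · cases hc : pvSeg ls with
      | nil => simp
      | cons s ss =>
        intro t ht
        rcases List.mem_cons.mp ht with ht | ht
        · simp [ht]
        · exact ih t (by rw [hc]; exact List.mem_cons_of_mem _ ht)

theorem pvIcat_ne_nil (segs : List (List (List Char))) (h : ∀ s ∈ segs, s ≠ []) :
    segs ≠ [] → pvIcat segs ≠ [] := by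
  intro hne
  cases segs with
  | nil => exact absurd rfl hne
  | cons s ss =>
    cases ss with
    | nil => simpa [pvIcat] using h s (by simp)
    | cons t ts => simp [pvIcat]

theorem pvjoin_append (sep : List Char) (xs ys : List (List Char))
    (hx : xs ≠ []) (hy : ys ≠ []) :
    PySem.Chars.join sep (xs ++ ys)
      = PySem.Chars.join sep xs ++ sep ++ PySem.Chars.join sep ys := by
  induction xs with
  | nil => exact absurd rfl hx
  | cons a as ih =>
    cases as with
    | nil =>
      cases ys with
      | nil => exact absurd rfl hy
      | cons y ys' =>
        simp [PySem.Chars.join_cons_cons, PySem.Chars.join_singleton]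
    | cons b bs =>
      have : ((a :: b :: bs) ++ ys) = a :: ((b :: bs) ++ ys) := by simp
      rw [this]
      have hcons : ((b :: bs) ++ ys) = b :: (bs ++ ys) := by simp
      rw [hcons, PySem.Chars.join_cons_cons, ← hcons, ih (by simp),
          PySem.Chars.join_cons_cons]
      simp [List.append_assoc]

theorem pvnlnl : ("\n".toList ++ "\n".toList : List Char) = "\n\n".toList := by decide

theorem pvP3 (segs : List (List (List Char))) (h : ∀ s ∈ segs, s ≠ []) :
    PySem.Chars.join "\n".toList (pvIcat segs)
      = PySem.Chars.join "\n\n".toList (segs.map (PySem.Chars.join "\n".toList)) := by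
  induction segs with
  | nil => simp [pvIcat]
  | cons s ss ih =>
    cases ss with
    | nil => simp [pvIcat, PySem.Chars.join_singleton]
    | cons t ts =>
      have hX : pvIcat (t :: ts) ≠ [] :=
        pvIcat_ne_nil (t :: ts) (fun x hx => h x (List.mem_cons_of_mem _ hx)) (by simp)
      have hs : s ≠ [] := h s (by simp)
      have step1 : pvIcat (s :: t :: ts) = s ++ ([] : List Char) :: pvIcat (t :: ts) := by
        simp [pvIcat]
      rw [step1, pvjoin_append _ _ _ hs (by simp)]
      have step2 : PySem.Chars.join "\n".toList (([] : List Char) :: pvIcat (t :: ts))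
          = "\n".toList ++ PySem.Chars.join "\n".toList (pvIcat (t :: ts)) := by
        cases hc : pvIcat (t :: ts) with
        | nil => exact absurd hc hX
        | cons u us => simp [PySem.Chars.join_cons_cons]
      rw [step2, ih (fun x hx => h x (List.mem_cons_of_mem _ hx))]
      have step3 : ((s :: t :: ts).map (PySem.Chars.join "\n".toList))
          = PySem.Chars.join "\n".toList s
              :: ((t :: ts).map (PySem.Chars.join "\n".toList)) := by simp
      rw [step3, List.map_cons, PySem.Chars.join_cons_cons, ← List.map_cons, ← pvnlnl]
      simp [List.append_assoc]

theorem pvfoldB_eq (L : List (List Char)) (segs : List (List (List Char)))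
    (cur : List (List Char)) :
    pvFin (L.foldl
        (fun (st : List (List (List Char)) × List (List Char)) line =>
          if PySem.Chars.strip line = "END:VEVENT".toList then (st.1 ++ [st.2 ++ [line]], [])
          else (st.1, st.2 ++ [line])) (segs, cur))
      = segs ++ pvGlue cur (pvSegP L) := by
  induction L generalizing segs cur with
  | nil =>
    simp only [List.foldl_nil, pvFin, pvGlue, pvSegP]
    split_ifs with hc <;> simp
  | cons l ls ih =>
    simp only [List.foldl_cons, pvSegP]
    split_ifs with h1
    · rw [ih]
      have : pvGlue ([] : List (List Char)) (pvSegP ls) = pvSegP ls := by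
        cases pvSegP ls <;> simp [pvGlue]
      rw [this]
      simp [pvGlue]
    · rw [ih]
      cases hc : pvSegP ls with
      | nil => simp [pvGlue]
      | cons s ss => simp [pvGlue]

theorem pvSeg_eq_segP_filter (L : List (List Char)) :
    pvSeg L = pvSegP (L.filter (fun l => PySem.Chars.strip l ≠ [])) := by
  induction L with
  | nil => simp [pvSeg, pvSegP]
  | cons l ls ih =>
    by_cases h1 : PySem.Chars.strip l = []
    · simp [pvSeg, h1, ih]
    · simp [pvSeg, pvSegP, h1, ih]

theorem pv_main (L : List (List Char)) :
    PySem.Chars.join "\n".toList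
        (pvPop (L.foldl (fun acc line =>
          if PySem.Chars.strip line ≠ [] then
            let acc := acc ++ [line]
            if PySem.Chars.strip line = "END:VEVENT".toList then acc ++ [([] : List Char)] else acc
          else acc) []))
      = PySem.Chars.join "\n\n".toList
          ((pvFin ((L.filter (fun l => PySem.Chars.strip l ≠ [])).foldl
            (fun (st : List (List (List Char)) × List (List Char)) line =>
              if PySem.Chars.strip line = "END:VEVENT".toList then (st.1 ++ [st.2 ++ [line]], [])
              else (st.1, st.2 ++ [line])) ([], []))).map
            (fun seg => PySem.Chars.join "\n".toList seg)) := by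
  rw [pvfoldA_eq, List.nil_append, pvP1, pvP3 _ (pvSeg_ne_nil L), pvfoldB_eq, List.nil_append]
  have : pvGlue ([] : List (List Char)) (pvSegP (L.filter (fun l => PySem.Chars.strip l ≠ [])))
      = pvSegP (L.filter (fun l => PySem.Chars.strip l ≠ [])) := by
    cases pvSegP (L.filter (fun l => PySem.Chars.strip l ≠ [])) <;> simp [pvGlue]
  rw [this, ← pvSeg_eq_segP_filter]

-- ===== VERDICT (by name: the statement is the Claim_ definition above) =====
theorem format_with_empty_lines_py_spec : Claim_equal_format_with_empty_lines_py := by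
  intro ics _
  unfold Spec_format_with_empty_lines_py format_with_empty_lines_py format_with_empty_lines_py_alt
  exact congrArg String.ofList (pv_main _)
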